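-- pv_equiv track=rewrite | github.com/AnnaLindeberg/AOC23 | day14.py | stoneSeq
-- ===== SOURCE A (Python) =====
-- def stoneSeq(column):
--     seq = []
--     roundStoneCount = 0
--     for idx, symb in enumerate(column, ):
--         if symb == '.':
--             continue
--         elif symb == 'O':
--             roundStoneCount += 1
--         elif symb == '#':
--             seq.append(('O', roundStoneCount))
--             roundStoneCount = 0
--             seq.append(('#', len(column) - idx))
--     seq.append(('O', roundStoneCount))
--     return seq
-- ===== SOURCE B (Python) =====
-- def stoneSeq(column):
--     n = len(column)
--     seq = []
--     rest = column
--     pos = 0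
--     while '#' in rest:
--         h = rest.index('#')
--         seq.append(('O', rest[:h].count('O')))
--         seq.append(('#', n - (pos + h)))
--         pos = pos + h + 1
--         rest = rest[h + 1:]
--     seq.append(('O', rest.count('O')))
--     return seq
-- ===== Notes on version B (the rewrite author's own statement) =====
-- stated objective: alternative
-- what changed: Replaces A's per-symbol state machine (running round-stone counter reset at each '#') by repeatedly finding the next '#' with index, emitting ('O', segment.count('O')) for the slice before it and the ('#', n-pos) entry, then continuing on the remainder slice.
import Mathlib
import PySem

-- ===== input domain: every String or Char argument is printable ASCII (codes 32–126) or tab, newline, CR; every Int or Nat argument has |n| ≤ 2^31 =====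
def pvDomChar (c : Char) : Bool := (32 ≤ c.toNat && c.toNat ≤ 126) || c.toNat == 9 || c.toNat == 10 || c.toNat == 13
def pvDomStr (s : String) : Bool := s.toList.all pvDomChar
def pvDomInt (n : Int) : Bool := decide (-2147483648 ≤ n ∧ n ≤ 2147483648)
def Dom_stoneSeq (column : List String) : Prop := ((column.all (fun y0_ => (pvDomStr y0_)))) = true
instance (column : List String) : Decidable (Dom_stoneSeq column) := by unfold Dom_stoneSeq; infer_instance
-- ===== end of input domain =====

-- B replaces A's per-symbol state machine by splitting the column at each '#' and
-- counting the 'O's of every segment with slice/count (objective: alternative; same O(n) cost).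

-- ===== PORT A =====
-- A: one pass over enumerate(column) carrying (seq, roundStoneCount).
def stoneSeqStep (n : Int) (st : List (String × Int) × Int) (p : Int × String) :
    List (String × Int) × Int :=
  if p.2 = "." then st
  else if p.2 = "O" then (st.1, st.2 + 1)
  else if p.2 = "#" then (st.1 ++ [("O", st.2), ("#", n - p.1)], 0)
  else st

def stoneSeq (column : List String) : List (String × Int) :=
  let n : Int := column.length
  let r := (PySem.List.enumerate column 0).foldl (stoneSeqStep n) ([], 0)
  r.1 ++ [("O", r.2)]

-- ===== PORT B =====
-- B's while loop: find the next '#' (rest.index), emit the segment's 'O'-count and the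
-- '#' entry, continue on rest[h+1:]. Slices/index/count via PySem.
def stoneSeqGo (n pos : Int) (rest : List String) : List (String × Int) :=
  match hidx : PySem.List.index? rest "#" with
  | some k =>
      ("O", ((PySem.List.count (PySem.List.slice rest none (some (k : Int))) "O" : Nat) : Int)) ::
      ("#", n - (pos + k)) ::
      stoneSeqGo n (pos + k + 1) (PySem.List.slice rest (some ((k : Int) + 1)) none)
  | none => [("O", ((PySem.List.count rest "O" : Nat) : Int))]
termination_by rest.length
decreasing_by
  have hk := PySem.List.getElem_of_index?_eq_some hidx
  obtain ⟨hlt, -, -⟩ := hk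
  have : (PySem.List.slice rest (some ((k : Int) + 1)) none) = rest.drop (k + 1) := by
    have : ((k : Int) + 1) = ((k + 1 : Nat) : Int) := by push_cast; ring
    rw [this, PySem.List.slice_from_natCast]
  simp [this]
  omega

def stoneSeq_alt (column : List String) : List (String × Int) :=
  stoneSeqGo (column.length : Int) 0 column

-- ===== PRECONDITION & SPEC =====
def Spec_stoneSeq (column : List String) (out : List (String × Int)) : Prop := out = stoneSeq_alt column
instance (column : List String) (out : List (String × Int)) : Decidable (Spec_stoneSeq column out) := by unfold Spec_stoneSeq; infer_instance

-- ===== CLAIM (what is proved, stated in full; the proofs are below) =====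
def Claim_equal_stoneSeq : Prop := ∀ (column : List String), Dom_stoneSeq column → Spec_stoneSeq column (stoneSeq column)

-- ===== LEMMAS AND PROOFS =====

-- add c to the count of the leading ("O", _) entry (goB's output always has that shape)
def pvBump (c : Int) : List (String × Int) → List (String × Int)
  | ("O", m) :: t => ("O", c + m) :: t
  | l => l

theorem stoneSeqGo_eq_none (n pos : Int) (rest : List String)
    (h : PySem.List.index? rest "#" = none) :
    stoneSeqGo n pos rest = [("O", ((PySem.List.count rest "O" : Nat) : Int))] := by
  rw [stoneSeqGo]; split
  · next k heq => rw [h] at heq; cases heq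
  · rfl

theorem stoneSeqGo_eq_some (n pos : Int) (rest : List String) (k : Nat)
    (h : PySem.List.index? rest "#" = some k) :
    stoneSeqGo n pos rest =
      ("O", ((PySem.List.count (PySem.List.slice rest none (some (k : Int))) "O" : Nat) : Int)) ::
      ("#", n - (pos + k)) ::
      stoneSeqGo n (pos + k + 1) (PySem.List.slice rest (some ((k : Int) + 1)) none) := by
  rw [stoneSeqGo]; split
  · next k' heq => rw [h] at heq; cases heq; rfl
  · next heq => rw [h] at heq; cases heq

theorem stoneSeqGo_shape (n pos : Int) (rest : List String) :
    ∃ m t, stoneSeqGo n pos rest = ("O", m) :: t := by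
  rw [stoneSeqGo]
  split <;> simp

theorem pvBump_zero (n pos : Int) (rest : List String) :
    pvBump 0 (stoneSeqGo n pos rest) = stoneSeqGo n pos rest := by
  obtain ⟨m, t, h⟩ := stoneSeqGo_shape n pos rest
  rw [h]; simp [pvBump]

theorem pvBump_bump (a b : Int) (n pos : Int) (rest : List String) :
    pvBump a (pvBump b (stoneSeqGo n pos rest)) = pvBump (a + b) (stoneSeqGo n pos rest) := by
  obtain ⟨m, t, h⟩ := stoneSeqGo_shape n pos rest
  rw [h]; simp [pvBump]; ring

-- peeling one non-'#' symbol off the front of goB's input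
theorem stoneSeqGo_cons_hash (n pos : Int) (rest : List String) :
    stoneSeqGo n pos ("#" :: rest) =
      ("O", 0) :: ("#", n - pos) :: stoneSeqGo n (pos + 1) rest := by
  rw [stoneSeqGo_eq_some n pos ("#" :: rest) 0 (PySem.List.index?_cons_self _ _)]
  have h0 : PySem.List.slice ("#" :: rest) none (some ((0 : Nat) : Int)) = [] := by
    rw [PySem.List.slice_to_natCast]; simp
  have h1 : PySem.List.slice ("#" :: rest) (some (((0 : Nat) : Int) + 1)) none = rest := by
    rw [show (((0 : Nat) : Int) + 1) = ((1 : Nat) : Int) by simp, PySem.List.slice_from_natCast]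
    simp
  rw [h0, h1]
  norm_num [PySem.List.count]

theorem stoneSeqGo_cons_ne (n pos : Int) (s : String) (rest : List String) (hs : s ≠ "#") :
    stoneSeqGo n pos (s :: rest) =
      pvBump (if s = "O" then 1 else 0) (stoneSeqGo n (pos + 1) rest) := by
  have hne : ¬ (s = "#") := hs
  have hcons := PySem.List.index?_cons_of_ne (v := "#") (xs := rest) hne
  cases h : PySem.List.index? rest "#" with
  | none =>
      rw [h] at hcons; simp only [Option.map_none] at hcons
      rw [stoneSeqGo_eq_none n pos _ hcons, stoneSeqGo_eq_none n (pos+1) _ h]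
      simp [pvBump, PySem.List.count, List.count_cons]
      by_cases hO : s = "O" <;> simp [hO] <;> ring
  | some k =>
      rw [h] at hcons; simp only [Option.map_some] at hcons
      rw [stoneSeqGo_eq_some n pos _ _ hcons, stoneSeqGo_eq_some n (pos+1) _ _ h]
      have hsl0 : PySem.List.slice (s :: rest) none (some ((k + 1 : Nat) : Int)) =
          s :: rest.take k := by
        rw [PySem.List.slice_to_natCast]; simp
      have hcast : ((k + 1 : Nat) : Int) = (k : Int) + 1 := by push_cast; ring
      have hsl0' : PySem.List.slice rest none (some ((k : Nat) : Int)) = rest.take k := by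
        rw [PySem.List.slice_to_natCast]
      have hsl1 : PySem.List.slice (s :: rest) (some (((k + 1 : Nat) : Int) + 1)) none =
          rest.drop (k + 1) := by
        have : (((k + 1 : Nat) : Int) + 1) = ((k + 2 : Nat) : Int) := by push_cast; ring
        rw [this, PySem.List.slice_from_natCast]; simp
      have hsl1' : PySem.List.slice rest (some ((k : Int) + 1)) none = rest.drop (k + 1) := by
        have : ((k : Int) + 1) = ((k + 1 : Nat) : Int) := by push_cast; ring
        rw [this, PySem.List.slice_from_natCast]
      rw [← hcast] at *
      rw [hsl0, hsl1, hsl0', hsl1']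
      simp [pvBump, PySem.List.count, List.count_cons]
      constructor
      · by_cases hO : s = "O" <;> simp [hO] <;> ring
      · exact ⟨by ring, by congr 1; ring⟩

-- main invariant: A's fold over the suffix, started at index i with accumulator (seq, cnt),
-- produces seq ++ (goB on the suffix with its first segment count bumped by cnt)
theorem stoneSeq_invariant (n : Int) (rest : List String) :
    ∀ (i : Int) (seq : List (String × Int)) (cnt : Int),
      (let r := (PySem.List.enumerate rest i).foldl (stoneSeqStep n) (seq, cnt)
       r.1 ++ [("O", r.2)]) = seq ++ pvBump cnt (stoneSeqGo n i rest) := by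
  induction rest with
  | nil =>
      intro i seq cnt
      rw [stoneSeqGo_eq_none n i [] (by simp)]
      simp [PySem.List.enumerate_nil, pvBump, PySem.List.count]
  | cons s rest ih =>
      intro i seq cnt
      rw [PySem.List.enumerate_cons]
      simp only [List.foldl_cons]
      by_cases hs : s = "#"
      · subst hs
        have hstep : stoneSeqStep n (seq, cnt) (i, "#") =
            (seq ++ [("O", cnt), ("#", n - i)], 0) := by
          simp [stoneSeqStep]
        rw [hstep, ih (i + 1) _ 0, stoneSeqGo_cons_hash, pvBump_zero]
        simp [pvBump]
      · have hstep : stoneSeqStep n (seq, cnt) (i, s) =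
            (seq, cnt + (if s = "O" then 1 else 0)) := by
          by_cases hd : s = "." <;> by_cases hO : s = "O" <;>
            simp_all [stoneSeqStep]
        rw [hstep, ih (i + 1) seq _, stoneSeqGo_cons_ne n i s rest hs, pvBump_bump]

-- ===== VERDICT (by name: the statement is the Claim_ definition above) =====
theorem stoneSeq_spec : Claim_equal_stoneSeq := by
  intro column _
  unfold Spec_stoneSeq stoneSeq stoneSeq_alt
  have h := stoneSeq_invariant (column.length : Int) column 0 [] 0
  simpa [pvBump_zero] using h
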